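-- pv_equiv track=rewrite | github.com/karim-farhang/ICPC-Problem-Solveing | Dynamic/Largest_rectangular_sub_matrix_whose_sum.py | largest_rectanglar_sum_is_0
-- ===== SOURCE A (Python) =====
-- def largest_rectanglar_sum_is_0(A):
--     if not A:
--         return 0
--     C = len(A[0])
--     col_expanded = []
--     for row in A:
--         expanded = []
--         for i in range(C):
--             s = 0
--             for j in range(i, C):
--                 s += row[j]
--                 expanded.append(s)
--         col_expanded.append(expanded)
--     total = 0
--     for i in range(len(col_expanded[0])):
--         for j in range(len(col_expanded)):
--             s = 0
--             for k in range(j, len(col_expanded)):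
--                 s += col_expanded[k][i]
--                 if s == 0:
--                     total += 1
--     return total
-- ===== SOURCE B (Python) =====
-- def largest_rectanglar_sum_is_0(A):
--     if not A:
--         return 0
--     C = len(A[0])
--     total = 0
--     for i in range(C):
--         strip = [0] * len(A)
--         for j in range(i, C):
--             strip = [s + row[j] for s, row in zip(strip, A)]
--             counts = {0: 1}
--             run = 0
--             for x in strip:
--                 run += x
--                 total += counts.get(run, 0)
--                 counts[run] = counts.get(run, 0) + 1
--     return total
-- ===== Notes on version B (the rewrite author's own statement) =====
-- stated objective: faster
-- what changed: Instead of materialising all column-pair partial sums per row and counting zeros with a quadratic double loop over row ranges, B keeps one running strip of row sums per column pair and counts zero-sum row ranges in a single pass with a prefix-sum hashmap.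
import Mathlib
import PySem

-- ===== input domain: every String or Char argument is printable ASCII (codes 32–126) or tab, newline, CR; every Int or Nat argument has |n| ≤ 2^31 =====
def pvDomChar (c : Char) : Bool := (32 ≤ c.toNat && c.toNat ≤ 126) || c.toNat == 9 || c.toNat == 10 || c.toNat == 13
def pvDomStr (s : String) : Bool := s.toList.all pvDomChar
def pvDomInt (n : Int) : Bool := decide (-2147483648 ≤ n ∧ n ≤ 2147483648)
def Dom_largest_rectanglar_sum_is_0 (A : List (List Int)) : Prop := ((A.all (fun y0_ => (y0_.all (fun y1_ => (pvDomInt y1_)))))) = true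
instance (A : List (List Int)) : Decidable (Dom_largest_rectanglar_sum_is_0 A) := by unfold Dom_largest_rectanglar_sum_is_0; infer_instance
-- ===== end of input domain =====

-- B replaces A's double loop over row ranges (per flattened column pair) by a one-pass
-- prefix-sum hashmap count over a running strip of row sums: a different, asymptotically
-- faster algorithm for the same count of zero-sum rectangles.
-- pyGetD with default 0 is exact under Pre_ (every index read there is in range).

-- ===== PORT A =====
def largest_rectanglar_sum_is_0 (A : List (List Int)) : Int :=
  if A = [] then 0
  else
    let C : Int := ((A.headD []).length : Int)
    let col_expanded : List (List Int) := A.foldl (fun acc row =>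
      acc ++ [((PySem.List.pyRange 0 C 1).foldl (fun exp i =>
        ((PySem.List.pyRange i C 1).foldl
          (fun (st : Int × List Int) j =>
            (st.1 + PySem.List.pyGetD row j 0, st.2 ++ [st.1 + PySem.List.pyGetD row j 0]))
          (0, exp)).2) [])]) []
    let L : Int := ((col_expanded.headD []).length : Int)
    let R : Int := (col_expanded.length : Int)
    (PySem.List.pyRange 0 L 1).foldl (fun total i =>
      (PySem.List.pyRange 0 R 1).foldl (fun total j =>
        ((PySem.List.pyRange j R 1).foldl
          (fun (st : Int × Int) k =>
            (st.1 + PySem.List.pyGetD (PySem.List.pyGetD col_expanded k []) i 0,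
             if st.1 + PySem.List.pyGetD (PySem.List.pyGetD col_expanded k []) i 0 = 0
             then st.2 + 1 else st.2))
          (0, total)).2) total) 0

-- ===== PORT B =====
def largest_rectanglar_sum_is_0_alt (A : List (List Int)) : Int :=
  if A = [] then 0
  else
    let C : Int := ((A.headD []).length : Int)
    (PySem.List.pyRange 0 C 1).foldl (fun total i =>
      (((PySem.List.pyRange i C 1).foldl
        (fun (st : List Int × Int) j =>
          let strip := (st.1.zip A).map (fun p => p.1 + PySem.List.pyGetD p.2 j 0)
          let fin := strip.foldl
            (fun (q : Int × PySem.Dict Int Int × Int) x =>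
              (q.1 + x,
               (q.2.1.insert (q.1 + x) (q.2.1.getD (q.1 + x) 0 + 1),
                q.2.2 + q.2.1.getD (q.1 + x) 0)))
            (0, (PySem.Dict.empty.insert 0 1), st.2)
          (strip, fin.2.2))
        (List.replicate A.length (0 : Int), total)).2)) 0

-- ===== PRECONDITION & SPEC =====
-- Pre_ excludes exactly the inputs on which the Python A raises IndexError:
-- matrices with a row shorter than the first row.
def Pre_largest_rectanglar_sum_is_0 (A : List (List Int)) : Prop :=
  ∀ row ∈ A, (A.headD []).length ≤ row.length
instance (A : List (List Int)) : Decidable (Pre_largest_rectanglar_sum_is_0 A) := by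
  unfold Pre_largest_rectanglar_sum_is_0; infer_instance
def pvWitness_largest_rectanglar_sum_is_0 : List (List Int) := [[1, -1], [0, 0]]
def Spec_largest_rectanglar_sum_is_0 (A : List (List Int)) (out : Int) : Prop := out = largest_rectanglar_sum_is_0_alt A
instance (A : List (List Int)) (out : Int) : Decidable (Spec_largest_rectanglar_sum_is_0 A out) := by unfold Spec_largest_rectanglar_sum_is_0; infer_instance

-- ===== CLAIM (what is proved, stated in full; the proofs are below) =====
def Claim_equal_largest_rectanglar_sum_is_0 : Prop := ∀ (A : List (List Int)), Dom_largest_rectanglar_sum_is_0 A → Pre_largest_rectanglar_sum_is_0 A → Spec_largest_rectanglar_sum_is_0 A (largest_rectanglar_sum_is_0 A)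

-- ===== LEMMAS AND PROOFS =====

-- `zcount s w` = how many nonempty prefixes of `w` have running sum `s + …` equal to 0
def zcount : Int → List Int → Int
  | _, [] => 0
  | s, x :: w => (if s + x = 0 then (1:Int) else 0) + zcount (s + x) w

-- A's count for one column vector: zero-sum runs grouped by start index
def dbl : List Int → Int
  | [] => 0
  | x :: u => zcount 0 (x :: u) + dbl u

-- B's count for one column vector: per end index, matches of the current prefix sum
-- against the multiset `seen` of earlier prefix sums
def zc2 : List Int → Int → List Int → Int
  | _, _, [] => 0
  | seen, run, x :: w => (seen.count (run + x) : Int) + zc2 (seen ++ [run + x]) (run + x) w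

-- like zc2 but `seen` is frozen (matches against the initial multiset only)
def hits : List Int → Int → List Int → Int
  | _, _, [] => 0
  | seen, run, x :: w => (seen.count (run + x) : Int) + hits seen (run + x) w

def rowfun (row : List Int) : Int → Int := fun j => PySem.List.pyGetD row j 0

-- sum of the row cells in columns a, a+1, …, a+k
def colsum (g : Int → Int) (a : Int) (k : Nat) : Int :=
  ((List.range (k + 1)).map (fun (c : Nat) => g (a + (c : Int)))).sum

-- the common value both programs compute (for nonempty input)
def bigsum (A : List (List Int)) : Int :=
  ((List.range ((A.headD []).length)).map (fun (i : Nat) =>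
    ((List.range ((A.headD []).length - i)).map (fun (k : Nat) =>
      dbl (A.map (fun r => colsum (rowfun r) (i : Int) k)))).sum)).sum

-- the flattened (column-pair) index set of A's `col_expanded` rows
def pairs (Cn : Nat) : List (Int × Nat) :=
  (List.range Cn).flatMap (fun (i : Nat) => (List.range (Cn - i)).map (fun (k : Nat) => ((i : Int), k)))

lemma zfold (w : List Int) : ∀ s t : Int,
    (w.foldl (fun st x => (st.1 + x, if st.1 + x = 0 then st.2 + 1 else st.2)) (s, t)).2
      = t + zcount s w := by
  induction w with
  | nil => intro s t; simp [zcount]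
  | cons x w ih =>
    intro s t
    simp only [List.foldl_cons, zcount]
    rw [ih]
    split_ifs <;> ring

lemma zc2_perm (v : List Int) : ∀ (s s' : List Int) (run : Int), s.Perm s' →
    zc2 s run v = zc2 s' run v := by
  induction v with
  | nil => intro s s' run _; rfl
  | cons x w ih =>
    intro s s' run h
    simp only [zc2]
    rw [h.count_eq, ih _ _ _ (h.append_right _)]

lemma zc2_append (v : List Int) : ∀ (s1 s2 : List Int) (run : Int),
    zc2 (s1 ++ s2) run v = zc2 s1 run v + hits s2 run v := by
  induction v with
  | nil => intro s1 s2 run; simp [zc2, hits]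
  | cons x w ih =>
    intro s1 s2 run
    simp only [zc2, hits]
    have hp : (s1 ++ s2 ++ [run + x]).Perm ((s1 ++ [run + x]) ++ s2) := by
      rw [List.append_assoc, List.append_assoc]
      exact List.Perm.append_left s1 List.perm_append_comm
    rw [zc2_perm _ _ _ _ hp, ih]
    simp [List.count_append]
    ring

lemma hits_singleton (v : List Int) : ∀ (y run : Int),
    hits [y] run v = zcount (run - y) v := by
  induction v with
  | nil => intro y run; rfl
  | cons x w ih =>
    intro y run
    simp only [hits, zcount]
    rw [ih]
    have : run - y + x = run + x - y := by ring
    rw [this]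
    congr 1
    by_cases h : run + x = y
    · have h2 : run + x - y = 0 := by omega
      simp [h, h2]
    · have hc : List.count (run + x) [y] = 0 := List.count_eq_zero.mpr (by simp [h])
      have h2 : ¬ (run + x - y = 0) := by omega
      simp [hc, h2]

lemma dbl_zcount (u : List Int) : zcount 0 u + dbl u.tail = dbl u := by
  cases u <;> simp [dbl, zcount]

lemma zc2_nil (v : List Int) : ∀ run : Int, zc2 [] run v = dbl v.tail := by
  induction v with
  | nil => intro run; rfl
  | cons x u ih =>
    intro run
    have h0 : zc2 [] run (x :: u) = zc2 ([] ++ [run + x]) (run + x) u := by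
      simp [zc2]
    rw [h0, zc2_append, ih, hits_singleton]
    simp only [List.tail_cons, sub_self]
    rw [add_comm, dbl_zcount]

lemma zc2_zero (v : List Int) : zc2 [0] 0 v = dbl v := by
  have h := zc2_append v [] [0] 0
  simp only [List.nil_append] at h
  rw [h, zc2_nil, hits_singleton]
  simp only [sub_zero]
  rw [add_comm, dbl_zcount]

lemma dfold (w : List Int) : ∀ (seen : List Int) (d : PySem.Dict Int Int) (run t : Int),
    (∀ y, d.getD y 0 = (seen.count y : Int)) →
    (w.foldl (fun q x => (q.1 + x,
        (q.2.1.insert (q.1 + x) (q.2.1.getD (q.1 + x) 0 + 1), q.2.2 + q.2.1.getD (q.1 + x) 0)))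
      (run, d, t)).2.2 = t + zc2 seen run w := by
  induction w with
  | nil => intro seen d run t _; simp [zc2]
  | cons x w ih =>
    intro seen d run t hinv
    simp only [List.foldl_cons, zc2]
    rw [ih (seen ++ [run + x]) _ (run + x) _ ?_]
    · rw [hinv]; ring
    · intro y
      by_cases hy : y = run + x
      · subst hy
        rw [PySem.Dict.getD_insert_self, hinv]
        simp [List.count_append]
      · rw [PySem.Dict.getD_insert_of_ne _ _ _ hy, hinv]
        have hne : run + x ≠ y := fun h => hy h.symm
        simp [List.count_append, hne]

lemma dbl_eq_sum_drops (v : List Int) :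
    ((List.range v.length).map (fun j => zcount 0 (v.drop j))).sum = dbl v := by
  induction v with
  | nil => simp [dbl]
  | cons x u ih =>
    rw [List.length_cons, List.range_succ_eq_map, List.map_cons, List.map_map,
      List.sum_cons, List.drop_zero, dbl]
    have hmap : (List.range u.length).map ((fun j => zcount 0 ((x :: u).drop j)) ∘ Nat.succ)
        = (List.range u.length).map (fun j => zcount 0 (u.drop j)) :=
      List.map_congr_left fun j _ => by simp
    rw [hmap, ih]

lemma colsum_zero (g : Int → Int) (a : Int) : colsum g a 0 = g a := by
  simp [colsum]

lemma colsum_succ (g : Int → Int) (a : Int) (k : Nat) :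
    colsum g a (k + 1) = g a + colsum g (a + 1) k := by
  rw [colsum, List.range_succ_eq_map, List.map_cons, List.map_map, List.sum_cons]
  congr 1
  · simp
  · rw [colsum]
    refine congrArg List.sum (List.map_congr_left fun c _ => ?_)
    show g (a + ((c + 1 : Nat) : Int)) = g (a + 1 + (c : Int))
    exact congrArg g (by push_cast; ring)

lemma foldps (row : List Int) : ∀ (m : Nat) (a s : Int) (acc : List Int),
    (((List.range m).map (fun (t : Nat) => a + (t : Int))).foldl
        (fun st j => (st.1 + PySem.List.pyGetD row j 0, st.2 ++ [st.1 + PySem.List.pyGetD row j 0]))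
        (s, acc)).2
      = acc ++ (List.range m).map (fun k => s + colsum (rowfun row) a k) := by
  intro m
  induction m with
  | zero => intro a s acc; simp
  | succ m ih =>
    intro a s acc
    rw [List.range_succ_eq_map, List.map_cons, List.map_map, List.foldl_cons]
    have hshift : (List.range m).map ((fun (t : Nat) => a + (t : Int)) ∘ Nat.succ)
        = (List.range m).map (fun (t : Nat) => (a + 1) + (t : Int)) :=
      List.map_congr_left fun t _ => by simp [Function.comp]; ring
    rw [hshift, ih]
    simp [colsum_zero, colsum_succ, rowfun, add_assoc]

lemma zip_self_map {α β : Type} (l : List α) (f : α → β) :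
    (l.map f).zip l = l.map (fun r => (f r, r)) := by
  induction l with
  | nil => rfl
  | cons x xs ih => simp [ih]

lemma getD_map_lt {α β : Type} (l : List α) (f : α → β) (n : Nat) (d : β) (d' : α)
    (h : n < l.length) : (l.map f).getD n d = f (l.getD n d') := by
  simp [List.getD_eq_getElem?_getD, List.getElem?_map, List.getElem?_eq_getElem h]

lemma map_range_getD {α β : Type} : ∀ (l : List α) (d : α) (G : α → β),
    (List.range l.length).map (fun i => G (l.getD i d)) = l.map G := by
  intro l
  induction l with
  | nil => intro d G; rfl
  | cons x xs ih =>
    intro d G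
    rw [List.length_cons, List.range_succ_eq_map, List.map_cons, List.map_map]
    simp only [List.getD_cons_zero, List.map_cons]
    congr 1
    have : (List.range xs.length).map ((fun i => G ((x :: xs).getD i d)) ∘ Nat.succ)
        = (List.range xs.length).map (fun i => G (xs.getD i d)) :=
      List.map_congr_left fun i _ => by simp
    rw [this, ih]

lemma sum_map_flatMap {α β : Type} (F : β → Int) : ∀ (l : List α) (g : α → List β),
    ((l.flatMap g).map F).sum = (l.map (fun a => ((g a).map F).sum)).sum := by
  intro l
  induction l with
  | nil => intro g; rfl
  | cons x xs ih => intro g; simp [List.flatMap_cons, ih]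

-- A's middle+inner loops, for one fixed flattened column index i
lemma Amid (ce : List (List Int)) (i : Int) : ∀ t : Int,
    (PySem.List.pyRange 0 (ce.length : Int) 1).foldl (fun total j =>
      ((PySem.List.pyRange j (ce.length : Int) 1).foldl
        (fun (st : Int × Int) k =>
          (st.1 + PySem.List.pyGetD (PySem.List.pyGetD ce k []) i 0,
           if st.1 + PySem.List.pyGetD (PySem.List.pyGetD ce k []) i 0 = 0
           then st.2 + 1 else st.2))
        (0, total)).2) t
    = t + dbl (ce.map (fun e => PySem.List.pyGetD e i 0)) := by
  intro t
  set v := ce.map (fun e => PySem.List.pyGetD e i 0) with hv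
  have hlen : ce.length = v.length := by simp [hv]
  have hpt : ∀ k, PySem.List.pyGetD (PySem.List.pyGetD ce k []) i 0 = PySem.List.pyGetD v k 0 := by
    intro k
    have h0 : PySem.List.pyGetD ([] : List Int) i 0 = 0 := by
      simp [PySem.List.pyGetD, PySem.List.pyGet?]
    have h := PySem.List.pyGetD_map (fun e => PySem.List.pyGetD e i 0) ce k []
    rw [h0] at h
    exact h.symm
  trans ((PySem.List.pyRange 0 (ce.length : Int) 1).foldl
      (fun total j => total + zcount 0 (v.drop j.toNat)) t)
  · apply PySem.List.foldl_congr_mem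
    intro acc j hj
    have hj0 : 0 ≤ j := (PySem.List.mem_pyRange_one.mp hj).1
    simp only [hpt]
    rw [hlen, PySem.List.foldl_pyRange_pyGetD' v 0
        (fun st x => (st.1 + x, if st.1 + x = 0 then st.2 + 1 else st.2)) (0, acc) hj0,
      zfold]
  · rw [PySem.List.foldl_add, hlen, PySem.List.pyRange_zero_natCast, List.map_map]
    have hm : (List.range v.length).map ((fun j => zcount 0 (v.drop j.toNat)) ∘ (fun (k : Nat) => (k : Int)))
        = (List.range v.length).map (fun j => zcount 0 (v.drop j)) :=
      List.map_congr_left fun j _ => by simp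
    rw [hm, dbl_eq_sum_drops]

-- B's inner loop over one block of columns, with the running strip as an invariant
lemma Binner (AA : List (List Int)) : ∀ (m : Nat) (a : Int) (f : List Int → Int) (t : Int),
    (((List.range m).map (fun (k : Nat) => a + (k : Int))).foldl
      (fun (st : List Int × Int) j =>
        let strip := (st.1.zip AA).map (fun p => p.1 + PySem.List.pyGetD p.2 j 0)
        let fin := strip.foldl
          (fun (q : Int × PySem.Dict Int Int × Int) x =>
            (q.1 + x,
             (q.2.1.insert (q.1 + x) (q.2.1.getD (q.1 + x) 0 + 1),
              q.2.2 + q.2.1.getD (q.1 + x) 0)))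
          (0, (PySem.Dict.empty.insert 0 1), st.2)
        (strip, fin.2.2))
      (AA.map f, t)).2
    = t + ((List.range m).map (fun k => dbl (AA.map (fun r => f r + colsum (rowfun r) a k)))).sum := by
  have hinv : ∀ y : Int, ((PySem.Dict.empty : PySem.Dict Int Int).insert 0 1).getD y 0
      = (List.count y [(0:Int)] : Int) := by
    intro y
    by_cases hy : y = 0
    · subst hy; rw [PySem.Dict.getD_insert_self]; simp
    · rw [PySem.Dict.getD_insert_of_ne _ _ _ hy]
      have hc : List.count y [(0:Int)] = 0 := List.count_eq_zero.mpr (by simp [hy])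
      simp [hc]
  intro m
  induction m with
  | zero => intro a f t; simp
  | succ m ih =>
    intro a f t
    rw [List.range_succ_eq_map, List.map_cons, List.map_map, List.foldl_cons]
    dsimp only
    have hstrip : ((AA.map f).zip AA).map
          (fun p => p.1 + PySem.List.pyGetD p.2 (a + ((0 : Nat) : Int)) 0)
        = AA.map (fun r => f r + PySem.List.pyGetD r a 0) := by
      rw [zip_self_map, List.map_map]
      exact List.map_congr_left fun r _ => by simp
    rw [hstrip]
    rw [dfold _ [0] _ 0 t hinv, zc2_zero]
    have hshift : (List.range m).map ((fun (k : Nat) => a + (k : Int)) ∘ Nat.succ)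
        = (List.range m).map (fun (k : Nat) => (a + 1) + (k : Int)) :=
      List.map_congr_left fun k _ => by simp [Function.comp]; ring
    rw [hshift, ih (a + 1) (fun r => f r + PySem.List.pyGetD r a 0)]
    simp only [List.map_cons, List.sum_cons, List.map_map]
    have hc0 : (fun r => f r + colsum (rowfun r) a 0) = fun r => f r + PySem.List.pyGetD r a 0 := by
      funext r; rw [colsum_zero]; rfl
    have hcs : (List.range m).map ((fun k => dbl (AA.map (fun r => f r + colsum (rowfun r) a k))) ∘ Nat.succ)
        = (List.range m).map (fun k => dbl (AA.map (fun r =>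
            (f r + PySem.List.pyGetD r a 0) + colsum (rowfun r) (a + 1) k))) :=
      List.map_congr_left fun k _ => by
        show dbl (AA.map (fun r => f r + colsum (rowfun r) a (k + 1))) = _
        refine congrArg dbl (List.map_congr_left fun r _ => ?_)
        rw [colsum_succ]
        show f r + (rowfun r a + colsum (rowfun r) (a + 1) k) = _
        rw [rowfun]
        ring
    rw [hc0, hcs]
    ring

-- A's per-row expansion equals the column-pair list mapped through segment sums
lemma Erow (row : List Int) (Cn : Nat) :
    (PySem.List.pyRange 0 (Cn : Int) 1).foldl (fun exp i =>
      ((PySem.List.pyRange i (Cn : Int) 1).foldl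
        (fun (st : Int × List Int) j =>
          (st.1 + PySem.List.pyGetD row j 0, st.2 ++ [st.1 + PySem.List.pyGetD row j 0]))
        (0, exp)).2) []
    = (pairs Cn).map (fun p => colsum (rowfun row) p.1 p.2) := by
  trans ((PySem.List.pyRange 0 (Cn : Int) 1).foldl (fun exp i =>
      exp ++ (List.range ((Cn : Int) - i).toNat).map (fun k => colsum (rowfun row) i k)) [])
  · apply PySem.List.foldl_congr_mem
    intro acc i _
    rw [PySem.List.pyRange_one, foldps]
    simp
  · rw [PySem.List.foldl_append_eq_flatMap, List.nil_append, PySem.List.pyRange_zero_natCast,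
      List.flatMap_map]
    rw [pairs, List.map_flatMap]
    refine congrArg (List.flatMap · (List.range Cn)) (funext fun i => ?_)
    rw [List.map_map]
    have : ((Cn : Int) - (i : Int)).toNat = Cn - i := by omega
    rw [this]
    exact List.map_congr_left fun k _ => rfl

lemma Aval (A : List (List Int)) (hA : A ≠ []) :
    largest_rectanglar_sum_is_0 A = bigsum A := by
  obtain ⟨r0, rest, rfl⟩ : ∃ r0 rest, A = r0 :: rest := by
    cases A with
    | nil => exact absurd rfl hA
    | cons a l => exact ⟨a, l, rfl⟩
  simp only [largest_rectanglar_sum_is_0, if_neg hA, List.headD_cons]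
  simp only [Erow]
  simp only [PySem.List.foldl_append_singleton_eq_map, List.nil_append]
  simp only [Amid]
  rw [PySem.List.foldl_add, zero_add]
  have hL : ((r0 :: rest).map (fun row => (pairs r0.length).map fun p => colsum (rowfun row) p.1 p.2)).headD []
      = (pairs r0.length).map fun p => colsum (rowfun r0) p.1 p.2 := rfl
  rw [hL, List.length_map]
  rw [PySem.List.pyRange_zero_natCast, List.map_map]
  have hstep : (List.range (pairs r0.length).length).map
        ((fun i => dbl ((List.map (fun row => (pairs r0.length).map fun p => colsum (rowfun row) p.1 p.2) (r0 :: rest)).map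
          (fun e => PySem.List.pyGetD e i 0))) ∘ (fun (k : Nat) => (k : Int)))
      = (List.range (pairs r0.length).length).map
        (fun idx => dbl ((r0 :: rest).map (fun row =>
          colsum (rowfun row) ((pairs r0.length).getD idx ((0:Int),(0:Nat))).1
            ((pairs r0.length).getD idx ((0:Int),(0:Nat))).2))) := by
    refine List.map_congr_left fun idx hidx => ?_
    have hlt : idx < (pairs r0.length).length := List.mem_range.mp hidx
    show dbl _ = dbl _
    congr 1
    rw [List.map_map]
    refine List.map_congr_left fun row _ => ?_
    show PySem.List.pyGetD ((pairs r0.length).map fun p => colsum (rowfun row) p.1 p.2) ((idx : Nat) : Int) 0 = _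
    rw [PySem.List.pyGetD_natCast,
      getD_map_lt _ _ _ _ ((0:Int),(0:Nat)) hlt]
  rw [hstep]
  rw [map_range_getD (pairs r0.length) ((0:Int),(0:Nat))
      (fun p => dbl ((r0 :: rest).map (fun row => colsum (rowfun row) p.1 p.2)))]
  rw [pairs, sum_map_flatMap, bigsum]
  simp only [List.headD_cons]
  refine congrArg List.sum (List.map_congr_left fun i _ => ?_)
  rw [List.map_map]
  rfl

lemma Bval (A : List (List Int)) (hA : A ≠ []) :
    largest_rectanglar_sum_is_0_alt A = bigsum A := by
  simp only [largest_rectanglar_sum_is_0_alt, if_neg hA]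
  have hrep : List.replicate A.length (0 : Int) = A.map (fun _ => (0:Int)) := by
    simp
  rw [hrep]
  trans ((PySem.List.pyRange 0 (((A.headD []).length : Nat) : Int) 1).foldl
    (fun total i => total + ((List.range ((((A.headD []).length : Nat) : Int) - i).toNat).map
        (fun k => dbl (A.map (fun r => colsum (rowfun r) i k)))).sum) 0)
  · apply PySem.List.foldl_congr_mem
    intro acc i _
    rw [PySem.List.pyRange_one, Binner]
    congr 1
    refine congrArg List.sum (List.map_congr_left fun k _ => ?_)
    show dbl (A.map (fun r => (0:Int) + colsum (rowfun r) i k)) = _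
    congr 1
    exact List.map_congr_left fun r _ => zero_add _
  · rw [PySem.List.foldl_add, zero_add, PySem.List.pyRange_zero_natCast, List.map_map, bigsum]
    refine congrArg List.sum (List.map_congr_left fun i _ => ?_)
    show ((List.range ((((A.headD []).length : Nat) : Int) - (i : Int)).toNat).map
        (fun k => dbl (A.map (fun r => colsum (rowfun r) (i : Int) k)))).sum = _
    have : ((((A.headD []).length : Nat) : Int) - (i : Int)).toNat = (A.headD []).length - i := by
      omega
    rw [this]

theorem main_eq (A : List (List Int)) :
    largest_rectanglar_sum_is_0 A = largest_rectanglar_sum_is_0_alt A := by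
  by_cases hA : A = []
  · subst hA; rfl
  · rw [Aval A hA, Bval A hA]

-- ===== VERDICT (by name: the statement is the Claim_ definition above) =====
theorem largest_rectanglar_sum_is_0_spec : Claim_equal_largest_rectanglar_sum_is_0 := by
  intro A _ _
  unfold Spec_largest_rectanglar_sum_is_0
  exact main_eq A
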